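-- pv_equiv track=rewrite | github.com/dimitri-bret/amns | ressources/python_file_exemple.py | mul_Poly
-- ===== SOURCE A (Python) =====
-- def mul_Poly(A,B,n,l):#ok
--     temp=[0]*n**2
--     Q=[0]*n
--     for i in range(n):
--         for j in range(n):
--             temp[i*n+j]=(A[i]*B[j])#comput partial product
--             if (i+j)<n:
--                Q[i+j]=Q[i+j]+temp[i*n+j]
--             else :
--                 Q[(i+j)-n]=Q[(i+j)%n]+l*temp[i*n+j]#mul par lambda simplifiable selon lambda
--     return Q
-- ===== SOURCE B (Python) =====
-- def mul_Poly(A, B, n, l):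
--     # Output-indexed: full linear convolution C (each coefficient as one sum),
--     # then fold the high half back with the lambda twist.
--     if n <= 0:
--         return []
--     C = [sum(A[i] * B[k - i] for i in range(max(0, k - n + 1), min(k, n - 1) + 1))
--          for k in range(2 * n - 1)]
--     return [C[k] + l * C[k + n] if k + n <= 2 * n - 2 else C[k] for k in range(n)]
-- ===== Notes on version B (the rewrite author's own statement) =====
-- stated objective: alternative
-- what changed: Replaces the mutating accumulator loop over all (i,j) index pairs (with the n*n temp scratch table) by a pure output-indexed computation: each linear-convolution coefficient is one explicit sum, and the high coefficients are then folded back with the lambda factor in a final comprehension.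
import Mathlib
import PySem

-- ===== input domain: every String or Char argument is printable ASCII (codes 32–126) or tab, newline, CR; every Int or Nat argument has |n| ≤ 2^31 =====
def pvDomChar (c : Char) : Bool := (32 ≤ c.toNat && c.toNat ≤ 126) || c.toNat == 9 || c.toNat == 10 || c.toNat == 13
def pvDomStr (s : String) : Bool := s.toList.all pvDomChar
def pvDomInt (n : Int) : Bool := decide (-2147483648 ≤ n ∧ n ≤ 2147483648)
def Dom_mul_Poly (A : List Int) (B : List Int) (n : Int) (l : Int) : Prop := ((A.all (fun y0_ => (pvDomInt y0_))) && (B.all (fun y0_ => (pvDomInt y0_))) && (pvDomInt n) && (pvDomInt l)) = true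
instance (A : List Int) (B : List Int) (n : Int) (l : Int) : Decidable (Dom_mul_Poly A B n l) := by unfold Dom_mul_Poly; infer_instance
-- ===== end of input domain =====

-- B replaces A's mutating accumulator loop over all (i,j) pairs (with an n*n scratch table)
-- by a pure output-indexed form: one explicit sum per convolution coefficient, then a final
-- fold of the high coefficients with the lambda factor (alternative decomposition, same cost).


-- ===== PORT A =====
-- the body of A's inner loop: one (i, j) step on the state (temp, Q)
def innerBodyA (A B : List Int) (n l i : Int) (st : List Int × List Int) (j : Int) :
    List Int × List Int :=
  let temp := PySem.List.pySetD st.1 (i * n + j)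
    (PySem.List.pyGetD A i 0 * PySem.List.pyGetD B j 0)
  if i + j < n then
    (temp, PySem.List.pySetD st.2 (i + j)
      (PySem.List.pyGetD st.2 (i + j) 0 + PySem.List.pyGetD temp (i * n + j) 0))
  else
    (temp, PySem.List.pySetD st.2 ((i + j) - n)
      (PySem.List.pyGetD st.2 (PySem.Int.mod (i + j) n) 0 +
        l * PySem.List.pyGetD temp (i * n + j) 0))

def mul_Poly (A : List Int) (B : List Int) (n : Int) (l : Int) : List Int :=
  let temp : List Int := List.replicate (n ^ 2).toNat 0
  let Q : List Int := List.replicate n.toNat 0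
  ((PySem.List.pyRange 0 n 1).foldl (fun st i =>
      (PySem.List.pyRange 0 n 1).foldl (innerBodyA A B n l i) st) (temp, Q)).2

-- ===== PORT B =====
-- one coefficient of the full linear convolution, as a single sum (B's inner generator)
def conv_alt (A : List Int) (B : List Int) (n : Int) (k : Int) : Int :=
  (PySem.List.pyRange (max 0 (k - n + 1)) (min k (n - 1) + 1) 1).foldl
    (fun s i => s + PySem.List.pyGetD A i 0 * PySem.List.pyGetD B (k - i) 0) 0

def mul_Poly_alt (A : List Int) (B : List Int) (n : Int) (l : Int) : List Int :=
  if n ≤ 0 then []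
  else
    let C := (PySem.List.pyRange 0 (2 * n - 1) 1).map (fun k => conv_alt A B n k)
    (PySem.List.pyRange 0 n 1).map (fun k =>
      if k + n ≤ 2 * n - 2 then
        PySem.List.pyGetD C k 0 + l * PySem.List.pyGetD C (k + n) 0
      else PySem.List.pyGetD C k 0)

-- ===== PRECONDITION & SPEC =====
-- Python A raises IndexError exactly when n exceeds the length of A or of B.
def Pre_mul_Poly (A : List Int) (B : List Int) (n : Int) (l : Int) : Prop :=
  n ≤ (A.length : Int) ∧ n ≤ (B.length : Int)
instance (A : List Int) (B : List Int) (n : Int) (l : Int) : Decidable (Pre_mul_Poly A B n l) := by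
  unfold Pre_mul_Poly; infer_instance

def pvWitness_mul_Poly : List Int × List Int × Int × Int := ([1, 2], [3, 4], 2, 5)

def Spec_mul_Poly (A : List Int) (B : List Int) (n : Int) (l : Int) (out : List Int) : Prop := out = mul_Poly_alt A B n l
instance (A : List Int) (B : List Int) (n : Int) (l : Int) (out : List Int) : Decidable (Spec_mul_Poly A B n l out) := by unfold Spec_mul_Poly; infer_instance

-- ===== CLAIM (what is proved, stated in full; the proofs are below) =====
def Claim_equal_mul_Poly : Prop := ∀ (A : List Int) (B : List Int) (n : Int) (l : Int), Dom_mul_Poly A B n l → Pre_mul_Poly A B n l → Spec_mul_Poly A B n l (mul_Poly A B n l)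

-- ===== LEMMAS AND PROOFS =====

-- contribution of row i to output coefficient k (0 ≤ k < n): exactly one j in range(n)
-- hits position k, namely j = k - i (low part) or j = k + n - i (high, lambda-twisted part)
def fK (A B : List Int) (n l k i : Int) : Int :=
  if i ≤ k then PySem.List.pyGetD A i 0 * PySem.List.pyGetD B (k - i) 0
  else l * (PySem.List.pyGetD A i 0 * PySem.List.pyGetD B (k + n - i) 0)

-- A's inner-loop body with the temp table eliminated (it reads back exactly what it wrote)
def rowStep (A B : List Int) (n l i : Int) (Q : List Int) (j : Int) : List Int :=
  if i + j < n then
    Q.set (i + j).toNat (Q.getD (i + j).toNat 0 + PySem.List.pyGetD A i 0 * PySem.List.pyGetD B j 0)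
  else
    Q.set (i + j - n).toNat
      (Q.getD (i + j - n).toNat 0 + l * (PySem.List.pyGetD A i 0 * PySem.List.pyGetD B j 0))

theorem getD_set_ne (Q : List Int) (p k : Nat) (v : Int) (h : p ≠ k) :
    (Q.set p v).getD k 0 = Q.getD k 0 := by
  simp [List.getD, List.getElem?_set_ne h]

theorem getD_set_self (Q : List Int) (k : Nat) (v : Int) (h : k < Q.length) :
    (Q.set k v).getD k 0 = v := by
  simp [List.getD, h]

theorem pyGetD_toNat (xs : List Int) (i : Int) (d : Int) (h : 0 ≤ i) :
    PySem.List.pyGetD xs i d = xs.getD i.toNat d := by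
  obtain ⟨m, rfl⟩ : ∃ m : Nat, i = (m : Int) := ⟨i.toNat, by omega⟩
  simp

theorem pyGetD_pySetD_self (xs : List Int) (i v : Int) (h0 : 0 ≤ i) (h1 : i.toNat < xs.length) :
    PySem.List.pyGetD (PySem.List.pySetD xs i v) i 0 = v := by
  rw [PySem.List.pySetD_of_nonneg _ _ h0, pyGetD_toNat _ _ _ h0]
  simp [List.getD, h1]

theorem length_foldl_innerBodyA (A B : List Int) (n l i : Int) (J : List Int)
    (st : List Int × List Int) :
    (J.foldl (innerBodyA A B n l i) st).1.length = st.1.length := by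
  induction J generalizing st with
  | nil => rfl
  | cons j J ih =>
      rw [List.foldl_cons, ih]
      simp only [innerBodyA]
      split <;> simp [PySem.List.length_pySetD]

theorem innerBodyA_snd (A B : List Int) (n l i j : Int) (st : List Int × List Int)
    (hi : 0 ≤ i ∧ i < n) (hj : 0 ≤ j ∧ j < n) (hlen : st.1.length = (n ^ 2).toNat) :
    (innerBodyA A B n l i st j).2 = rowStep A B n l i st.2 j := by
  obtain ⟨hi0, hi1⟩ := hi
  obtain ⟨hj0, hj1⟩ := hj
  have hn : 0 < n := by omega
  have hidx0 : 0 ≤ i * n + j := by nlinarith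
  have hidx1 : i * n + j < n ^ 2 := by nlinarith
  have hidxlt : (i * n + j).toNat < st.1.length := by
    rw [hlen]; omega
  simp only [innerBodyA, rowStep]
  rw [pyGetD_pySetD_self _ _ _ hidx0 hidxlt]
  split
  · rw [PySem.List.pySetD_of_nonneg st.2 _ (by omega), pyGetD_toNat st.2 (i + j) 0 (by omega)]
  · have hmod : PySem.Int.mod (i + j) n = i + j - n := by
      rw [PySem.Int.mod_eq_emod_of_pos hn, ← Int.sub_emod_right (i + j) n]
      exact Int.emod_eq_of_lt (by omega) (by omega)
    rw [hmod, PySem.List.pySetD_of_nonneg st.2 _ (by omega),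
      pyGetD_toNat st.2 (i + j - n) 0 (by omega)]

theorem inner_drop_temp (A B : List Int) (n l i : Int) (hi : 0 ≤ i ∧ i < n)
    (J : List Int) (hJ : ∀ j ∈ J, 0 ≤ j ∧ j < n) :
    ∀ (temp Q : List Int), temp.length = (n ^ 2).toNat →
      (J.foldl (innerBodyA A B n l i) (temp, Q)).2 = J.foldl (rowStep A B n l i) Q := by
  induction J with
  | nil => intro temp Q _; rfl
  | cons j J ih =>
      intro temp Q hlen
      have hj := hJ j (by simp)
      have hlen' : (innerBodyA A B n l i (temp, Q) j).1.length = (n ^ 2).toNat := by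
        simp only [innerBodyA]
        split <;> simpa [PySem.List.length_pySetD]
      have h2 := innerBodyA_snd A B n l i j (temp, Q) hi hj hlen
      rw [List.foldl_cons, List.foldl_cons, ← h2]
      have := ih (fun x hx => hJ x (by simp [hx]))
        (innerBodyA A B n l i (temp, Q) j).1 (innerBodyA A B n l i (temp, Q) j).2 hlen'
      rwa [Prod.mk.eta] at this

theorem length_rowStep (A B : List Int) (n l i : Int) (Q : List Int) (j : Int) :
    (rowStep A B n l i Q j).length = Q.length := by
  simp only [rowStep]; split <;> simp

theorem length_foldl_rowStep (A B : List Int) (n l i : Int) (J : List Int) (Q : List Int) :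
    (J.foldl (rowStep A B n l i) Q).length = Q.length := by
  induction J generalizing Q with
  | nil => rfl
  | cons j J ih => rw [List.foldl_cons, ih, length_rowStep]

-- a block of j's that never touch position k leaves Q.getD k unchanged
theorem rowStep_untouched (A B : List Int) (n l i : Int) (hi0 : 0 ≤ i) (k : Nat)
    (J : List Int)
    (hJ : ∀ j ∈ J, 0 ≤ j ∧ j < n ∧ (if i + j < n then i + j else i + j - n) ≠ (k : Int)) :
    ∀ Q : List Int, (J.foldl (rowStep A B n l i) Q).getD k 0 = Q.getD k 0 := by
  induction J with
  | nil => intro Q; rfl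
  | cons j J ih =>
      intro Q
      obtain ⟨hj0, hj1, hjk⟩ := hJ j (by simp)
      rw [List.foldl_cons, ih (fun x hx => hJ x (by simp [hx]))]
      simp only [rowStep]
      split
      · next h => exact getD_set_ne _ _ _ _ (by simp only [if_pos h] at hjk; omega)
      · next h => exact getD_set_ne _ _ _ _ (by simp only [if_neg h] at hjk; omega)

-- one full inner loop adds exactly fK … i at position k
theorem inner_fold_getD (A B : List Int) (n l i : Int) (hi : 0 ≤ i ∧ i < n)
    (Q : List Int) (hQ : Q.length = n.toNat) (k : Nat) (hk : (k : Int) < n) :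
    ((PySem.List.pyRange 0 n 1).foldl (rowStep A B n l i) Q).getD k 0
      = Q.getD k 0 + fK A B n l k i := by
  obtain ⟨hi0, hi1⟩ := hi
  set j0 : Int := if i ≤ (k : Int) then (k : Int) - i else (k : Int) + n - i with hj0def
  have hj0 : 0 ≤ j0 ∧ j0 < n := by simp only [hj0def]; split <;> omega
  have huntouched : ∀ (J : List Int), (∀ j ∈ J, 0 ≤ j ∧ j < n ∧ j ≠ j0) →
      ∀ Q' : List Int, (J.foldl (rowStep A B n l i) Q').getD k 0 = Q'.getD k 0 := by
    intro J hJ Q'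
    apply rowStep_untouched A B n l i hi0
    intro j hj
    obtain ⟨h1, h2, h3⟩ := hJ j hj
    refine ⟨h1, h2, ?_⟩
    simp only [hj0def] at h3
    by_cases hik : i ≤ (k : Int)
    · rw [if_pos hik] at h3
      split <;> omega
    · rw [if_neg hik] at h3
      split <;> omega
  rw [PySem.List.pyRange_one_append 0 j0 n (by omega) (by omega),
      PySem.List.pyRange_one_cons (by omega : j0 < n), List.foldl_append, List.foldl_cons]
  rw [huntouched _ (fun j hj => by
      rw [PySem.List.mem_pyRange_one] at hj; exact ⟨by omega, by omega, by omega⟩)]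
  set Q1 := (PySem.List.pyRange 0 j0 1).foldl (rowStep A B n l i) Q with hQ1def
  have hQ1 : Q1.getD k 0 = Q.getD k 0 :=
    huntouched (PySem.List.pyRange 0 j0 1) (fun j hj => by
      rw [PySem.List.mem_pyRange_one] at hj; exact ⟨by omega, by omega, by omega⟩) Q
  have hklen : k < Q1.length := by
    rw [hQ1def, length_foldl_rowStep]; omega
  simp only [rowStep, fK]
  by_cases hik : i ≤ (k : Int)
  · have hj0v : j0 = (k : Int) - i := by simp [hj0def, hik]
    rw [hj0v, if_pos (by omega : i + ((k : Int) - i) < n), if_pos hik,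
        show (i + ((k : Int) - i)).toNat = k by omega,
        getD_set_self _ _ _ hklen, hQ1]
  · have hj0v : j0 = (k : Int) + n - i := by simp [hj0def, hik]
    rw [hj0v, if_neg (by omega : ¬ i + ((k : Int) + n - i) < n), if_neg hik,
        show (i + ((k : Int) + n - i) - n).toNat = k by omega,
        getD_set_self _ _ _ hklen, hQ1]

-- the outer loop sums the per-row contributions at position k
theorem outer_fold_getD (A B : List Int) (n l : Int) (I : List Int)
    (hI : ∀ i ∈ I, 0 ≤ i ∧ i < n) (k : Nat) (hk : (k : Int) < n) :
    ∀ Q : List Int, Q.length = n.toNat →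
      (I.foldl (fun Q i => (PySem.List.pyRange 0 n 1).foldl (rowStep A B n l i) Q) Q).getD k 0
        = Q.getD k 0 + (I.map (fK A B n l k)).sum := by
  induction I with
  | nil => intro Q _; simp
  | cons i I ih =>
      intro Q hQ
      have hi := hI i (by simp)
      have hlen : ((PySem.List.pyRange 0 n 1).foldl (rowStep A B n l i) Q).length = n.toNat := by
        rw [length_foldl_rowStep]; exact hQ
      simp only [List.foldl_cons, List.map_cons, List.sum_cons]
      rw [ih (fun x hx => hI x (by simp [hx])) _ hlen, inner_fold_getD A B n l i hi Q hQ k hk]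
      ring

theorem conv_alt_sum (A B : List Int) (n k : Int) :
    conv_alt A B n k =
      ((PySem.List.pyRange (max 0 (k - n + 1)) (min k (n - 1) + 1) 1).map
        (fun i => PySem.List.pyGetD A i 0 * PySem.List.pyGetD B (k - i) 0)).sum := by
  unfold conv_alt
  rw [PySem.List.foldl_add]
  ring

-- B's entry k equals the same row-contribution sum
theorem alt_entry (A B : List Int) (n l : Int) (k : Nat) (hk : (k : Int) < n) :
    (if (k : Int) + n ≤ 2 * n - 2 then
        conv_alt A B n k + l * conv_alt A B n ((k : Int) + n)
      else conv_alt A B n k)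
      = ((PySem.List.pyRange 0 n 1).map (fK A B n l k)).sum := by
  rw [conv_alt_sum, show max 0 ((k : Int) - n + 1) = 0 by omega,
      show min (k : Int) (n - 1) + 1 = (k : Int) + 1 by omega]
  by_cases hksm : (k : Int) + n ≤ 2 * n - 2
  · rw [if_pos hksm, conv_alt_sum, show max 0 ((k : Int) + n - n + 1) = (k : Int) + 1 by omega,
        show min ((k : Int) + n) (n - 1) + 1 = n by omega]
    rw [PySem.List.pyRange_one_append 0 ((k : Int) + 1) n (by omega) (by omega),
        List.map_append, List.sum_append]
    congr 1
    · refine (congrArg List.sum (List.map_congr_left fun i hi => ?_)).symm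
      rw [PySem.List.mem_pyRange_one] at hi
      simp only [fK, if_pos (by omega : i ≤ (k : Int))]
    · rw [← List.sum_map_mul_left]
      refine (congrArg List.sum (List.map_congr_left fun i hi => ?_)).symm
      rw [PySem.List.mem_pyRange_one] at hi
      simp only [fK, if_neg (by omega : ¬ i ≤ (k : Int))]
  · rw [if_neg hksm, show (k : Int) + 1 = n by omega]
    refine (congrArg List.sum (List.map_congr_left fun i hi => ?_)).symm
    rw [PySem.List.mem_pyRange_one] at hi
    simp only [fK, if_pos (by omega : i ≤ (k : Int))]

theorem outer_drop_temp (A B : List Int) (n l : Int) (I : List Int)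
    (hI : ∀ i ∈ I, 0 ≤ i ∧ i < n) :
    ∀ (temp Q : List Int), temp.length = (n ^ 2).toNat →
      (I.foldl (fun st i => (PySem.List.pyRange 0 n 1).foldl (innerBodyA A B n l i) st)
        (temp, Q)).2
      = I.foldl (fun Q i => (PySem.List.pyRange 0 n 1).foldl (rowStep A B n l i) Q) Q := by
  induction I with
  | nil => intro temp Q _; rfl
  | cons i I ih =>
      intro temp Q hlen
      have hi := hI i (by simp)
      have hJ : ∀ j ∈ PySem.List.pyRange 0 n 1, 0 ≤ j ∧ j < n := fun j hj => by
        rw [PySem.List.mem_pyRange_one] at hj; omega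
      have hlen' : ((PySem.List.pyRange 0 n 1).foldl (innerBodyA A B n l i) (temp, Q)).1.length
          = (n ^ 2).toNat := by rw [length_foldl_innerBodyA]; exact hlen
      have h2 := inner_drop_temp A B n l i hi _ hJ temp Q hlen
      rw [List.foldl_cons, List.foldl_cons, ← h2]
      have := ih (fun x hx => hI x (by simp [hx]))
        ((PySem.List.pyRange 0 n 1).foldl (innerBodyA A B n l i) (temp, Q)).1
        ((PySem.List.pyRange 0 n 1).foldl (innerBodyA A B n l i) (temp, Q)).2 hlen'
      rwa [Prod.mk.eta] at this

theorem outer_length (A B : List Int) (n l : Int) (I : List Int) (Q : List Int) :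
    (I.foldl (fun Q i => (PySem.List.pyRange 0 n 1).foldl (rowStep A B n l i) Q) Q).length
      = Q.length := by
  induction I generalizing Q with
  | nil => rfl
  | cons i I ih => rw [List.foldl_cons, ih, length_foldl_rowStep]

-- ===== VERDICT (by name: the statement is the Claim_ definition above) =====
theorem mul_Poly_spec : Claim_equal_mul_Poly := by
  intro A B n l _ _
  show mul_Poly A B n l = mul_Poly_alt A B n l
  by_cases hn : n ≤ 0
  · have hA : mul_Poly A B n l = [] := by
      unfold mul_Poly
      rw [PySem.List.pyRange_one_eq_nil hn]
      simp only [List.foldl_nil]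
      rw [show n.toNat = 0 by omega]
      rfl
    rw [hA, mul_Poly_alt, if_pos hn]
  · have hn' : 0 < n := by omega
    have hI : ∀ i ∈ PySem.List.pyRange 0 n 1, 0 ≤ i ∧ i < n := fun i hi => by
      rw [PySem.List.mem_pyRange_one] at hi; omega
    have hA : mul_Poly A B n l
        = (PySem.List.pyRange 0 n 1).foldl
            (fun Q i => (PySem.List.pyRange 0 n 1).foldl (rowStep A B n l i) Q)
            (List.replicate n.toNat 0) := by
      unfold mul_Poly
      exact outer_drop_temp A B n l _ hI _ _ (by simp)
    have hB : mul_Poly_alt A B n l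
        = (PySem.List.pyRange 0 n 1).map (fun k =>
            if k + n ≤ 2 * n - 2 then
              PySem.List.pyGetD
                ((PySem.List.pyRange 0 (2 * n - 1) 1).map (fun k => conv_alt A B n k)) k 0 +
                l * PySem.List.pyGetD
                  ((PySem.List.pyRange 0 (2 * n - 1) 1).map (fun k => conv_alt A B n k)) (k + n) 0
            else PySem.List.pyGetD
              ((PySem.List.pyRange 0 (2 * n - 1) 1).map (fun k => conv_alt A B n k)) k 0) := by
      unfold mul_Poly_alt
      rw [if_neg hn]
    rw [hA, hB]
    apply List.ext_getElem
    · rw [outer_length, List.length_replicate, List.length_map,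
        PySem.List.length_pyRange_one]
      omega
    · intro m h1 h2
      have hm : m < n.toNat := by
        rw [outer_length, List.length_replicate] at h1; exact h1
      have hmk : ((m : Int)) < n := by omega
      rw [List.getElem_map, PySem.List.getElem_pyRange_one, ← List.getD_eq_getElem _ 0 h1,
        outer_fold_getD A B n l _ hI m hmk (List.replicate n.toNat 0) (by simp),
        List.getD_eq_getElem _ 0 (by simpa using hm), List.getElem_replicate]
      simp only [zero_add]
      by_cases hcase : (m : Int) + n ≤ 2 * n - 2
      · rw [if_pos hcase,
          PySem.List.pyGetD_map_pyRange_of_nonneg _ _ _ _ (by omega) (by omega),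
          PySem.List.pyGetD_map_pyRange_of_nonneg _ _ _ _ (by omega) (by omega),
          ← alt_entry A B n l m hmk, if_pos hcase]
      · rw [if_neg hcase,
          PySem.List.pyGetD_map_pyRange_of_nonneg _ _ _ _ (by omega) (by omega),
          ← alt_entry A B n l m hmk, if_neg hcase]
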